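-- pv_equiv track=rewrite | github.com/alwaysnix/sessionfs | src/sessionfs/utils/title_utils.py | _iter_usable_lines
-- ===== SOURCE A (Python) =====
-- def _iter_usable_lines(text: str):
--     in_fence = False
--     in_frontmatter = False
--     frontmatter_seen = False
--
--     for i, line in enumerate(text.split("\n")):
--         stripped = line.strip()
--
--         if stripped == "---":
--             if i == 0 and not frontmatter_seen:
--                 in_frontmatter = True
--                 frontmatter_seen = True
--                 continue
--             elif in_frontmatter:
--                 in_frontmatter = False
--                 continue
--
--         if in_frontmatter:
--             continue
--         if stripped.startswith("```"):
--             in_fence = not in_fence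
--             continue
--         if in_fence:
--             continue
--         if stripped:
--             yield stripped
-- ===== SOURCE B (Python) =====
-- def _iter_usable_lines(text: str):
--     lines = text.split("\n")
--     start = 0
--     # Phase 1: frontmatter can only open on line 0; consume it (or everything,
--     # if it is never closed) before scanning content.
--     if lines and lines[0].strip() == "---":
--         start = len(lines)
--         for j in range(1, len(lines)):
--             if lines[j].strip() == "---":
--                 start = j + 1
--                 break
--     # Phase 2: fence-aware scan over the remaining lines.
--     in_fence = False
--     for line in lines[start:]:
--         stripped = line.strip()
--         if stripped.startswith("```"):
--             in_fence = not in_fence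
--             continue
--         if in_fence:
--             continue
--         if stripped:
--             yield stripped
-- ===== Notes on version B (the rewrite author's own statement) =====
-- stated objective: simpler
-- what changed: Replaces the single loop carrying three interacting flags (in_fence/in_frontmatter/frontmatter_seen) by two phases: a forward scan that consumes the frontmatter block first, then a fence-aware scan over the remaining lines with one flag.
import Mathlib
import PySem

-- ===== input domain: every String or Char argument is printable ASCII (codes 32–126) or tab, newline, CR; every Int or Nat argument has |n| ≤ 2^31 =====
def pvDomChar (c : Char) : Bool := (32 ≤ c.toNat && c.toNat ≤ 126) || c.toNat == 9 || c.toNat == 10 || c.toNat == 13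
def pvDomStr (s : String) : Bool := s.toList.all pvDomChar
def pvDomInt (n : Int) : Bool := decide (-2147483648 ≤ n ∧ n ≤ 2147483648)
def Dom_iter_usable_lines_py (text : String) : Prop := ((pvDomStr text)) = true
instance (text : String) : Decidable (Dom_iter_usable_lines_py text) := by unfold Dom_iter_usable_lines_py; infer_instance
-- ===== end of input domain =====

-- B replaces A's three-flag single loop by two phases (consume frontmatter, then a
-- one-flag fence scan); same yields, same cost ("simpler").

-- ===== PORT A =====
-- A's generator: one loop over enumerate(text.split("\n")) with flags
-- in_fence / in_frontmatter / frontmatter_seen; ported as structural recursion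
-- carrying the same flags and the enumerate index i.
def pvAGo (i : Int) (inFence inFm fmSeen : Bool) : List String → List String
  | [] => []
  | line :: ls =>
    let stripped := PySem.Str.strip line
    if stripped == "---" && (i == 0 && !fmSeen) then
      pvAGo (i + 1) inFence true true ls
    else if stripped == "---" && inFm then
      pvAGo (i + 1) inFence false fmSeen ls
    else if inFm then
      pvAGo (i + 1) inFence inFm fmSeen ls
    else if PySem.Str.startswith stripped "```" then
      pvAGo (i + 1) (!inFence) inFm fmSeen ls
    else if inFence then
      pvAGo (i + 1) inFence inFm fmSeen ls
    else if stripped ≠ "" then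
      stripped :: pvAGo (i + 1) inFence inFm fmSeen ls
    else
      pvAGo (i + 1) inFence inFm fmSeen ls

def iter_usable_lines_py (text : String) : List String :=
  pvAGo 0 false false false ((PySem.Str.split? text "\n").getD [])

-- ===== PORT B =====
-- Phase 1 of B: find the line closing the frontmatter, return the lines after it
-- (none = unterminated, everything is consumed).
def pvBFindClose : List String → Option (List String)
  | [] => none
  | l :: ls => if PySem.Str.strip l == "---" then some ls else pvBFindClose ls

-- Phase 2 of B: fence-aware scan with a single flag.
def pvBPhase2 (inFence : Bool) : List String → List String
  | [] => []
  | l :: ls =>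
    let stripped := PySem.Str.strip l
    if PySem.Str.startswith stripped "```" then pvBPhase2 (!inFence) ls
    else if inFence then pvBPhase2 inFence ls
    else if stripped ≠ "" then stripped :: pvBPhase2 inFence ls
    else pvBPhase2 inFence ls

def iter_usable_lines_py_alt (text : String) : List String :=
  let lines := (PySem.Str.split? text "\n").getD []
  match lines with
  | [] => []
  | l0 :: rest =>
    if PySem.Str.strip l0 == "---" then
      match pvBFindClose rest with
      | some rs => pvBPhase2 false rs
      | none => []
    else pvBPhase2 false lines

-- ===== PRECONDITION & SPEC =====
def Spec_iter_usable_lines_py (text : String) (out : List String) : Prop := out = iter_usable_lines_py_alt text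
instance (text : String) (out : List String) : Decidable (Spec_iter_usable_lines_py text out) := by unfold Spec_iter_usable_lines_py; infer_instance

-- ===== CLAIM (what is proved, stated in full; the proofs are below) =====
def Claim_equal_iter_usable_lines_py : Prop := ∀ (text : String), Dom_iter_usable_lines_py text → Spec_iter_usable_lines_py text (iter_usable_lines_py text)

-- ===== LEMMAS AND PROOFS =====

-- Outside frontmatter and past line 0, A's loop is exactly B's phase-2 scan.
theorem pvAGo_tail (ls : List String) : ∀ (i : Int) (f seen : Bool), 1 ≤ i →
    pvAGo i f false seen ls = pvBPhase2 f ls := by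
  induction ls with
  | nil => intro i f seen _; rfl
  | cons l ls ih =>
    intro i f seen hi
    have hi0 : (i == 0) = false := by simp; omega
    simp only [pvAGo, pvBPhase2, hi0, Bool.and_false, Bool.false_and,
      if_false, Bool.false_eq_true]
    have h1 : (1 : Int) ≤ i + 1 := by omega
    split_ifs with hb hf hs
    · exact ih (i + 1) (!f) seen h1
    · exact ih (i + 1) f seen h1
    · rw [ih (i + 1) f seen h1]
    · exact ih (i + 1) f seen h1

-- Inside frontmatter past line 0, A's loop skips to the closing '---' (or to the
-- end), then continues as B's phase-2 scan: exactly B's phase 1.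
theorem pvAGo_fm (ls : List String) : ∀ (i : Int) (f seen : Bool), 1 ≤ i →
    pvAGo i f true seen ls =
      (match pvBFindClose ls with
       | some rs => pvBPhase2 f rs
       | none => []) := by
  induction ls with
  | nil => intro i f seen _; rfl
  | cons l ls ih =>
    intro i f seen hi
    have hi0 : (i == 0) = false := by simp; omega
    have h1 : (1 : Int) ≤ i + 1 := by omega
    by_cases hd : PySem.Str.strip l == "---"
    · simp only [pvAGo, pvBFindClose, hd, hi0, Bool.and_false, Bool.false_and,
        Bool.and_true, if_false, if_true, Bool.false_eq_true]
      exact pvAGo_tail ls (i + 1) f seen h1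
    · simp only [pvAGo, pvBFindClose, hd, hi0, Bool.false_and, Bool.and_false,
        Bool.false_eq_true, if_false, if_true]
      exact ih (i + 1) f seen h1

-- ===== VERDICT (by name: the statement is the Claim_ definition above) =====
theorem iter_usable_lines_py_spec : Claim_equal_iter_usable_lines_py := by
  intro text _
  unfold Spec_iter_usable_lines_py iter_usable_lines_py iter_usable_lines_py_alt
  cases h : (PySem.Str.split? text "\n").getD [] with
  | nil => rfl
  | cons l0 rest =>
    by_cases h0 : PySem.Str.strip l0 == "---"
    · simp only [pvAGo, h0, if_true, Bool.true_and, Bool.not_false,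
        Bool.and_true]
      simpa using pvAGo_fm rest 1 false true (by omega)
    · simp only [pvAGo, pvBPhase2, h0, Bool.false_and, Bool.and_false,
        Bool.false_eq_true, if_false]
      split_ifs <;>
        simp_all [pvAGo_tail rest 1 false false (by omega),
          pvAGo_tail rest 1 true false (by omega)]
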